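-- pv_equiv track=rewrite | github.com/cc13ny/all-in | talempd/offpop/swapsort.py | solution
-- ===== SOURCE A (Python) =====
-- def solution(A):
--     origin = A[:]
--     A.sort()
--
--     cnt = 0
--     for i in range(len(A)):
--         if A[i] != origin[i]:
--             cnt += 1
--     if cnt == 0 or cnt == 2:
--         return True
--     return False
-- ===== SOURCE B (Python) =====
-- def solution(A):
--     n = len(A)
--     if n < 2:
--         return True
--     # p: first index whose element exceeds the minimum of the suffix after it
--     p = -1
--     mn = A[n - 1]
--     for i in range(n - 2, -1, -1):
--         if A[i] > mn:
--             p = i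
--         elif A[i] < mn:
--             mn = A[i]
--     if p == -1:
--         return True
--     # q: last index whose element is below the maximum of the prefix before it
--     q = -1
--     mx = A[0]
--     for j in range(1, n):
--         if A[j] < mx:
--             q = j
--         elif A[j] > mx:
--             mx = A[j]
--     t = list(A)
--     t[p], t[q] = t[q], t[p]
--     return all(t[k] <= t[k + 1] for k in range(n - 1))
-- ===== Notes on version B (the rewrite author's own statement) =====
-- stated objective: faster
-- what changed: A sorts a copy and counts positions where the array differs from its sorted version; B never sorts: two linear scans (suffix-min right-to-left, prefix-max left-to-right) locate the leftmost and rightmost order violations, then one swap is applied and adjacent-sortedness is checked in a single pass.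
import Mathlib
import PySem

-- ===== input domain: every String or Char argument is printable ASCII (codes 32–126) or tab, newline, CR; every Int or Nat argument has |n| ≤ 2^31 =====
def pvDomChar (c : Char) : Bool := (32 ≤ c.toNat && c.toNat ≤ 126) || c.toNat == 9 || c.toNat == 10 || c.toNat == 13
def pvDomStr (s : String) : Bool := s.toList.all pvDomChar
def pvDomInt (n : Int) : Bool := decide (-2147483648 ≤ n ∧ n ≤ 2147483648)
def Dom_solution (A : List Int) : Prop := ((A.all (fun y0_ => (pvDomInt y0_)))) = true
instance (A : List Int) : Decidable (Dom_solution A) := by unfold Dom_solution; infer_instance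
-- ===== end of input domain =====

-- B replaces A's sort-and-count (O(n log n)) by two linear index scans locating the leftmost/rightmost
-- order violations and a single swap-then-sortedness check (O(n)).  Python A sorts its argument in
-- place (a caller-visible mutation); B does not mutate — the equivalence proved here is about the
-- return value only.

-- ===== PORT A =====
def solution (A : List Int) : Bool :=
  -- origin = A[:] ; A.sort()
  let origin := A
  let sortedA := PySem.List.sorted A (fun x => x) false
  -- cnt = 0 ; for i in range(len(A)): if A[i] != origin[i]: cnt += 1
  let cnt : Int := (PySem.List.pyRange 0 (sortedA.length : Int) 1).foldl
    (fun cnt i =>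
      if PySem.List.pyGetD sortedA i 0 ≠ PySem.List.pyGetD origin i 0 then cnt + 1 else cnt) 0
  -- indices produced by range(len(A)) are always in range, so pyGetD's default is never used
  if cnt = 0 ∨ cnt = 2 then true else false

-- ===== PORT B =====
-- loop body of B's right-to-left scan (state = (p, mn))
def altStepP (A : List Int) (st : Int × Int) (i : Int) : Int × Int :=
  let x := PySem.List.pyGetD A i 0
  if x > st.2 then (i, st.2)
  else if x < st.2 then (st.1, x)
  else st

-- loop body of B's left-to-right scan (state = (q, mx))
def altStepQ (A : List Int) (st : Int × Int) (j : Int) : Int × Int :=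
  let x := PySem.List.pyGetD A j 0
  if x < st.2 then (j, st.2)
  else if x > st.2 then (st.1, x)
  else st

def solution_alt (A : List Int) : Bool :=
  let n : Int := A.length
  if n < 2 then true
  else
    -- p = -1 ; mn = A[n-1] ; for i in range(n-2, -1, -1): …
    let stP := (PySem.List.pyRange (n - 2) (-1) (-1)).foldl (altStepP A)
      (-1, PySem.List.pyGetD A (n - 1) 0)
    if stP.1 = -1 then true
    else
      -- q = -1 ; mx = A[0] ; for j in range(1, n): …
      let stQ := (PySem.List.pyRange 1 n 1).foldl (altStepQ A)
        (-1, PySem.List.pyGetD A 0 0)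
      -- t = list(A) ; t[p], t[q] = t[q], t[p]   (p, q are in-range indices here)
      let t := PySem.List.pySetD (PySem.List.pySetD A stP.1 (PySem.List.pyGetD A stQ.1 0))
        stQ.1 (PySem.List.pyGetD A stP.1 0)
      -- all(t[k] <= t[k+1] for k in range(n-1))
      (PySem.List.pyRange 0 (n - 1) 1).all
        (fun k => decide (PySem.List.pyGetD t k 0 ≤ PySem.List.pyGetD t (k + 1) 0))

-- ===== PRECONDITION & SPEC =====
def Spec_solution (A : List Int) (out : Bool) : Prop := out = solution_alt A
instance (A : List Int) (out : Bool) : Decidable (Spec_solution A out) := by unfold Spec_solution; infer_instance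

-- ===== CLAIM (what is proved, stated in full; the proofs are below) =====
def Claim_equal_solution : Prop := ∀ (A : List Int), Dom_solution A → Spec_solution A (solution A)

-- ===== LEMMAS AND PROOFS =====

-- the sorted copy of a (what Python's A.sort() produces)
def srt (a : List Int) : List Int := PySem.List.sorted a (fun x => x) false

-- indices where a disagrees with its sorted copy, in increasing order
def mism (a : List Int) : List Nat :=
  (List.range a.length).filter (fun i => decide (a.getD i 0 ≠ (srt a).getD i 0))

-- a[i] has a strictly smaller element to its right
def violP (a : List Int) (i : Nat) : Bool :=
  (List.range a.length).any (fun j => decide (i < j ∧ a.getD j 0 < a.getD i 0))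

-- a[j] has a strictly larger element to its left
def violQ (a : List Int) (j : Nat) : Bool :=
  (List.range j).any (fun i => decide (a.getD j 0 < a.getD i 0))

-- first index ≥ i with violP (none if no such index)
def fv (a : List Int) (i : Nat) : Option Nat :=
  if h : i < a.length then (if violP a i then some i else fv a (i + 1)) else none
termination_by a.length - i

-- last index ≤ j with violQ (none if no such index)
def lv (a : List Int) : Nat → Option Nat
  | 0 => none
  | j + 1 => if violQ a (j + 1) then some (j + 1) else lv a j

def suffMin (a : List Int) (i : Nat) : Int :=
  if _h : i + 1 < a.length then min (a.getD i 0) (suffMin a (i + 1)) else a.getD i 0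
termination_by a.length - i

def prefMax (a : List Int) : Nat → Int
  | 0 => a.getD 0 0
  | j + 1 => max (prefMax a j) (a.getD (j + 1) 0)

def enc : Option Nat → Int
  | none => -1
  | some k => (k : Int)


-- ---------- generic helpers ----------

theorem foldl_count_int {alpha : Type} (l : List alpha) (P : alpha → Prop) [DecidablePred P] (c : Int) :
    l.foldl (fun c x => if P x then c + 1 else c) c = c + ((l.countP (fun x => decide (P x)) : Nat) : Int) := by
  induction l generalizing c with
  | nil => simp
  | cons x t ih =>
    simp only [List.foldl_cons, List.countP_cons, ih]
    by_cases h : P x <;> simp [h] <;> push_cast <;> ring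

theorem mem_drop_iff (l : List Int) (m : Nat) (v : Int) :
    v ∈ l.drop m ↔ ∃ k, m ≤ k ∧ k < l.length ∧ l.getD k 0 = v := by
  constructor
  · intro hv
    obtain ⟨i, hi, hval⟩ := List.mem_iff_getElem.mp hv
    refine ⟨m + i, Nat.le_add_right _ _, ?_, ?_⟩
    · have := List.length_drop (l := l) (i := m); omega
    · rw [List.getD_eq_getElem l 0 (by have := List.length_drop (l := l) (i := m); omega)]
      rw [← hval, List.getElem_drop]
  · rintro ⟨k, hmk, hk, hval⟩
    apply List.mem_iff_getElem.mpr
    refine ⟨k - m, by simp [List.length_drop]; omega, ?_⟩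
    rw [List.getElem_drop]
    rw [List.getD_eq_getElem l 0 hk] at hval
    simp only [show m + (k - m) = k by omega]
    exact hval

theorem mem_take_iff (l : List Int) (m : Nat) (v : Int) :
    v ∈ l.take m ↔ ∃ k, k < m ∧ k < l.length ∧ l.getD k 0 = v := by
  constructor
  · intro hv
    obtain ⟨i, hi, hval⟩ := List.mem_iff_getElem.mp hv
    have hlen : i < m ∧ i < l.length := by
      have h := hi; simp [List.length_take] at h; omega
    refine ⟨i, hlen.1, hlen.2, ?_⟩
    rw [List.getD_eq_getElem l 0 hlen.2, ← hval, List.getElem_take]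
  · rintro ⟨k, hkm, hk, hval⟩
    apply List.mem_iff_getElem.mpr
    refine ⟨k, by simp [List.length_take]; omega, ?_⟩
    rw [List.getElem_take]
    rw [List.getD_eq_getElem l 0 hk] at hval
    exact hval

theorem pairwise_iff_adj (l : List Int) :
    l.Pairwise (· ≤ ·) ↔ ∀ k, k + 1 < l.length → l.getD k 0 ≤ l.getD (k + 1) 0 := by
  rw [List.pairwise_iff_getElem]
  constructor
  · intro h k hk
    rw [List.getD_eq_getElem l 0 (by omega), List.getD_eq_getElem l 0 hk]
    exact h k (k + 1) (by omega) hk (by omega)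
  · intro h i j hi hj hij
    have key : ∀ d j, j = i + 1 + d → j < l.length → l.getD i 0 ≤ l.getD j 0 := by
      intro d
      induction d with
      | zero =>
        intro j hj1 hj2
        subst hj1
        exact h i (by omega)
      | succ d ih =>
        intro j hj1 hj2
        have h1 := ih (j - 1) (by omega) (by omega)
        have h2 := h (j - 1) (by omega)
        have : j - 1 + 1 = j := by omega
        rw [this] at h2
        exact le_trans h1 h2
    have := key (j - i - 1) j (by omega) hj
    rwa [List.getD_eq_getElem l 0 (by omega), List.getD_eq_getElem l 0 hj] at this

-- count of an updated list, as an equation over Nat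
theorem count_set_eq (l : List Int) (i : Nat) (h : i < l.length) (x v : Int) :
    (l.set i x).count v + (if l.getD i 0 = v then 1 else 0)
      = l.count v + (if x = v then 1 else 0) := by
  have hl : l.take i ++ l[i] :: l.drop (i + 1) = l := by
    rw [List.getElem_cons_drop, List.take_append_drop]
  have hset : l.set i x = l.take i ++ x :: l.drop (i + 1) := by
    rw [List.set_eq_take_append_cons_drop]; simp [h]
  have hgd : l.getD i 0 = l[i] := List.getD_eq_getElem l 0 h
  conv_rhs => rw [← hl]
  rw [hset, List.count_append, List.count_append, List.count_cons, List.count_cons, hgd]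
  simp only [beq_iff_eq]
  split_ifs <;> omega

-- ---------- facts about srt and mism ----------

theorem srt_length (a : List Int) : (srt a).length = a.length :=
  PySem.List.length_sorted a (fun x => x) false

theorem srt_perm (a : List Int) : (srt a).Perm a :=
  PySem.List.sorted_perm a (fun x => x) false

theorem srt_pairwise (a : List Int) : (srt a).Pairwise (· ≤ ·) :=
  PySem.List.sorted_pairwise a (fun x => x)

theorem srt_mono (a : List Int) {i j : Nat} (hij : i ≤ j) (hj : j < a.length) :
    (srt a).getD i 0 ≤ (srt a).getD j 0 := by
  have hj' : j < (srt a).length := by rw [srt_length]; exact hj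
  rw [List.getD_eq_getElem _ 0 (by omega), List.getD_eq_getElem _ 0 hj']
  exact PySem.List.sorted_id_getElem_mono a hij hj'

theorem mem_mism (a : List Int) (k : Nat) :
    k ∈ mism a ↔ k < a.length ∧ a.getD k 0 ≠ (srt a).getD k 0 := by
  simp [mism, List.mem_filter, List.mem_range]

theorem mism_pairwise (a : List Int) : (mism a).Pairwise (· < ·) :=
  List.Pairwise.filter _ List.pairwise_lt_range

theorem mism_nil_iff (a : List Int) : mism a = [] ↔ a.Pairwise (· ≤ ·) := by
  constructor
  · intro h
    have heq : a = srt a := by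
      apply List.ext_getElem (by rw [srt_length])
      intro i h1 h2
      have : i ∉ mism a := by simp [h]
      rw [mem_mism] at this
      push_neg at this
      have := this h1
      rwa [List.getD_eq_getElem a 0 h1, List.getD_eq_getElem _ 0 h2] at this
    rw [heq]; exact srt_pairwise a
  · intro h
    have : srt a = a := PySem.List.sorted_eq_self_of_pairwise a (fun x => x) (by simpa using h)
    apply List.eq_nil_iff_forall_not_mem.mpr
    intro k hk
    rw [mem_mism, this] at hk
    exact hk.2 rfl

theorem solution_eq_mism (a : List Int) :
    solution a = decide ((mism a).length = 0 ∨ (mism a).length = 2) := by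
  unfold solution
  simp only [PySem.List.length_sorted, PySem.List.pyRange_zero_natCast, List.foldl_map,
    PySem.List.pyGetD_natCast]
  rw [foldl_count_int (List.range a.length)
    (fun k => (PySem.List.sorted a (fun x => x) false).getD k 0 ≠ a.getD k 0) 0]
  have hmm : (List.range a.length).countP
      (fun k => decide ((PySem.List.sorted a (fun x => x) false).getD k 0 ≠ a.getD k 0))
      = (mism a).length := by
    rw [mism, ← List.countP_eq_length_filter]
    apply List.countP_congr
    intro k _
    simp [srt, ne_comm]
  rw [hmm]
  have hiff : ((0 : Int) + ((mism a).length : Int) = 0 ∨ (0 : Int) + ((mism a).length : Int) = 2)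
      ↔ ((mism a).length = 0 ∨ (mism a).length = 2) := by omega
  by_cases h : (mism a).length = 0 ∨ (mism a).length = 2
  · rw [if_pos (hiff.mpr h)]
    exact (decide_eq_true h).symm
  · rw [if_neg (fun hc => h (hiff.mp hc))]
    exact (decide_eq_false h).symm

-- ---------- violation predicates vs suffix-min / prefix-max ----------

theorem violP_iff (a : List Int) (i : Nat) :
    violP a i = true ↔ ∃ j, i < j ∧ j < a.length ∧ a.getD j 0 < a.getD i 0 := by
  unfold violP
  rw [List.any_eq_true]
  constructor
  · rintro ⟨j, hj, hcond⟩
    rw [List.mem_range] at hj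
    simp only [decide_eq_true_eq] at hcond
    exact ⟨j, hcond.1, hj, hcond.2⟩
  · rintro ⟨j, h1, h2, h3⟩
    exact ⟨j, List.mem_range.mpr h2, by simp only [decide_eq_true_eq]; exact ⟨h1, h3⟩⟩

theorem violQ_iff (a : List Int) (j : Nat) :
    violQ a j = true ↔ ∃ i, i < j ∧ a.getD j 0 < a.getD i 0 := by
  unfold violQ
  rw [List.any_eq_true]
  constructor
  · rintro ⟨i, hi, hcond⟩
    rw [List.mem_range] at hi
    simp only [decide_eq_true_eq] at hcond
    exact ⟨i, hi, hcond⟩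
  · rintro ⟨i, h1, h2⟩
    exact ⟨i, List.mem_range.mpr h1, by simp only [decide_eq_true_eq]; exact h2⟩

theorem suffMin_le (a : List Int) (i j : Nat) (hij : i ≤ j) (hj : j < a.length) :
    suffMin a i ≤ a.getD j 0 := by
  suffices H : ∀ d i j, a.length - i ≤ d → i ≤ j → j < a.length → suffMin a i ≤ a.getD j 0 from
    H a.length i j (by omega) hij hj
  intro d
  induction d with
  | zero => intro i j h1 h2 h3; omega
  | succ d ih =>
    intro i j h1 h2 h3
    unfold suffMin
    split_ifs with h
    · rcases Nat.eq_or_lt_of_le h2 with he | hlt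
      · subst he; exact min_le_left _ _
      · exact le_trans (min_le_right _ _) (ih (i + 1) j (by omega) (by omega) h3)
    · have : j = i := by omega
      subst this; exact le_refl _

theorem suffMin_attained (a : List Int) (i : Nat) (hi : i < a.length) :
    ∃ j, i ≤ j ∧ j < a.length ∧ suffMin a i = a.getD j 0 := by
  suffices H : ∀ d i, a.length - i ≤ d → i < a.length →
      ∃ j, i ≤ j ∧ j < a.length ∧ suffMin a i = a.getD j 0 from H a.length i (by omega) hi
  intro d
  induction d with
  | zero => intro i h1 h2; omega
  | succ d ih =>
    intro i h1 h2
    unfold suffMin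
    split_ifs with h
    · rcases ih (i + 1) (by omega) (by omega) with ⟨j, hj1, hj2, hj3⟩
      rcases min_cases (a.getD i 0) (suffMin a (i + 1)) with ⟨hmin, _⟩ | ⟨hmin, _⟩
      · exact ⟨i, le_refl _, h2, hmin⟩
      · exact ⟨j, by omega, hj2, by rw [hmin, hj3]⟩
    · exact ⟨i, le_refl _, h2, rfl⟩

theorem prefMax_le (a : List Int) : ∀ j i, i ≤ j → j < a.length → a.getD i 0 ≤ prefMax a j := by
  intro j
  induction j with
  | zero =>
    intro i h1 _
    have : i = 0 := by omega
    subst this; exact le_refl _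
  | succ j ih =>
    intro i h1 h2
    show a.getD i 0 ≤ max (prefMax a j) (a.getD (j + 1) 0)
    rcases Nat.eq_or_lt_of_le h1 with he | hlt
    · subst he; exact le_max_right _ _
    · exact le_trans (ih i (by omega) (by omega)) (le_max_left _ _)

theorem prefMax_attained (a : List Int) : ∀ j, j < a.length →
    ∃ i, i ≤ j ∧ prefMax a j = a.getD i 0 := by
  intro j
  induction j with
  | zero => intro _; exact ⟨0, le_refl _, rfl⟩
  | succ j ih =>
    intro h2
    rcases ih (by omega) with ⟨i, hi1, hi2⟩
    rcases max_cases (prefMax a j) (a.getD (j + 1) 0) with ⟨hmax, _⟩ | ⟨hmax, _⟩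
    · exact ⟨i, by omega, by show max (prefMax a j) (a.getD (j + 1) 0) = _; rw [hmax, hi2]⟩
    · exact ⟨j + 1, le_refl _, by show max (prefMax a j) (a.getD (j + 1) 0) = _; rw [hmax]⟩

theorem violP_iff_suffMin (a : List Int) (i : Nat) (h : i + 1 < a.length) :
    violP a i = true ↔ suffMin a (i + 1) < a.getD i 0 := by
  rw [violP_iff]
  constructor
  · rintro ⟨j, h1, h2, h3⟩
    exact lt_of_le_of_lt (suffMin_le a (i + 1) j (by omega) h2) h3
  · intro hlt
    obtain ⟨j, hj1, hj2, hj3⟩ := suffMin_attained a (i + 1) h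
    rw [hj3] at hlt
    exact ⟨j, by omega, hj2, hlt⟩

theorem violQ_iff_prefMax (a : List Int) (j : Nat) (h : j + 1 < a.length) :
    violQ a (j + 1) = true ↔ a.getD (j + 1) 0 < prefMax a j := by
  rw [violQ_iff]
  constructor
  · rintro ⟨i, h1, h2⟩
    exact lt_of_lt_of_le h2 (prefMax_le a j i (by omega) (by omega))
  · intro hlt
    obtain ⟨i, hi1, hi2⟩ := prefMax_attained a j (by omega)
    rw [hi2] at hlt
    exact ⟨i, by omega, hlt⟩

-- ---------- fv / lv ----------

theorem fv_none_of_ge (a : List Int) (i : Nat) (h : a.length ≤ i) : fv a i = none := by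
  unfold fv
  simp [Nat.not_lt.mpr h]

theorem fv_of_first (a : List Int) (i0 : Nat) (hi0 : i0 < a.length) (hv : violP a i0 = true)
    (hbel : ∀ k, k < i0 → violP a k = false) : fv a 0 = some i0 := by
  suffices H : ∀ d m, i0 - m ≤ d → m ≤ i0 → fv a m = some i0 from H i0 0 (by omega) (by omega)
  intro d
  induction d with
  | zero =>
    intro m h1 h2
    have : m = i0 := by omega
    subst this
    unfold fv
    simp [hi0, hv]
  | succ d ih =>
    intro m h1 h2
    by_cases hm : m = i0
    · subst hm
      unfold fv
      simp [hi0, hv]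
    · have hmlt : m < i0 := by omega
      unfold fv
      rw [dif_pos (by omega : m < a.length), if_neg (by simp [hbel m hmlt])]
      exact ih (m + 1) (by omega) (by omega)

theorem violP_last (a : List Int) : violP a (a.length - 1) = false := by
  rw [← Bool.not_eq_true, violP_iff]
  rintro ⟨j, h1, h2, _⟩
  omega

theorem fv_pred (a : List Int) (h : 1 ≤ a.length) : fv a (a.length - 1) = none := by
  unfold fv
  rw [dif_pos (by omega : a.length - 1 < a.length), if_neg (by simp [violP_last])]
  exact fv_none_of_ge a _ (by omega)

theorem noviolP_of_pairwise (a : List Int) (h : a.Pairwise (· ≤ ·)) (i : Nat) :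
    violP a i = false := by
  rw [← Bool.not_eq_true, violP_iff]
  rintro ⟨j, h1, h2, h3⟩
  have := List.pairwise_iff_getElem.mp h i j (by omega) h2 h1
  rw [List.getD_eq_getElem a 0 h2, List.getD_eq_getElem a 0 (by omega : i < a.length)] at h3
  omega

theorem fv_none_of_pairwise (a : List Int) (h : a.Pairwise (· ≤ ·)) : fv a 0 = none := by
  suffices H : ∀ d i, a.length - i ≤ d → fv a i = none from H a.length 0 (by omega)
  intro d
  induction d with
  | zero => intro i h1; exact fv_none_of_ge a i (by omega)
  | succ d ih =>
    intro i h1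
    by_cases hi : i < a.length
    · unfold fv
      rw [dif_pos hi, if_neg (by simp [noviolP_of_pairwise a h i])]
      exact ih (i + 1) (by omega)
    · exact fv_none_of_ge a i (by omega)

theorem lv_of_last (a : List Int) (j0 : Nat) (hj0 : violQ a j0 = true)
    (habv : ∀ k, j0 < k → k < a.length → violQ a k = false) :
    ∀ m, j0 ≤ m → m < a.length → lv a m = some j0 := by
  intro m
  induction m with
  | zero =>
    intro h _
    have : j0 = 0 := by omega
    subst this
    simp [violQ] at hj0
  | succ m ih =>
    intro h hlen
    by_cases hc : j0 = m + 1
    · subst hc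
      simp [lv, hj0]
    · have : violQ a (m + 1) = false := habv (m + 1) (by omega) hlen
      simp [lv, this]
      exact ih (by omega) (by omega)

-- ---------- the two scans compute fv / lv ----------

theorem fv_unfold (a : List Int) (i : Nat) (h : i < a.length) :
    fv a i = if violP a i then some i else fv a (i + 1) := by
  conv_lhs => unfold fv
  rw [dif_pos h]

theorem suffMin_unfold (a : List Int) (i : Nat) (h : i + 1 < a.length) :
    suffMin a i = min (a.getD i 0) (suffMin a (i + 1)) := by
  conv_lhs => unfold suffMin
  rw [dif_pos h]

theorem stepP_spec (a : List Int) (i : Nat) (h : i + 1 < a.length) :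
    altStepP a (enc (fv a (i + 1)), suffMin a (i + 1)) ((i : Nat) : Int)
      = (enc (fv a i), suffMin a i) := by
  unfold altStepP
  simp only [PySem.List.pyGetD_natCast]
  have hfv : ∀ b : Bool, violP a i = b → fv a i = (if b then some i else fv a (i + 1)) := by
    intro b hb
    rw [fv_unfold a i (by omega), hb]
  have hsm : suffMin a i = min (a.getD i 0) (suffMin a (i + 1)) := suffMin_unfold a i h
  by_cases h1 : suffMin a (i + 1) < a.getD i 0
  · rw [if_pos h1]
    rw [hfv true ((violP_iff_suffMin a i h).mpr h1), hsm, min_eq_right (le_of_lt h1)]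
    rfl
  · rw [if_neg h1]
    have hviol : violP a i = false := by
      rw [← Bool.not_eq_true, violP_iff_suffMin a i h]; exact h1
    by_cases h2 : a.getD i 0 < suffMin a (i + 1)
    · rw [if_pos h2, hfv false hviol, hsm, min_eq_left (le_of_lt h2)]
      rfl
    · rw [if_neg h2, hfv false hviol, hsm]
      have : a.getD i 0 = suffMin a (i + 1) := by omega
      rw [this, min_self]
      rfl

theorem foldP_inv (a : List Int) : ∀ i : Nat, i + 1 < a.length →
    (PySem.List.pyRange (i : Int) (-1) (-1)).foldl (altStepP a)
        (enc (fv a (i + 1)), suffMin a (i + 1))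
      = (enc (fv a 0), suffMin a 0) := by
  intro i
  induction i with
  | zero =>
    intro h
    rw [show ((0 : Nat) : Int) = 0 by norm_num,
      PySem.List.pyRange_neg_one_cons (by omega : (-1 : Int) < 0),
      PySem.List.pyRange_neg_one_eq_nil (by omega : (0 : Int) - 1 ≤ -1)]
    simp only [List.foldl_cons, List.foldl_nil]
    have := stepP_spec a 0 h
    rw [show ((0 : Nat) : Int) = 0 by norm_num] at this
    exact this
  | succ i ih =>
    intro h
    rw [PySem.List.pyRange_neg_one_cons (by push_cast; omega : (-1 : Int) < ((i + 1 : Nat) : Int))]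
    simp only [List.foldl_cons]
    rw [show ((i + 1 : Nat) : Int) - 1 = ((i : Nat) : Int) by push_cast; omega]
    rw [stepP_spec a (i + 1) h]
    exact ih (by omega)

theorem stepQ_spec (a : List Int) (j : Nat) (h : j + 1 < a.length) :
    altStepQ a (enc (lv a j), prefMax a j) ((j + 1 : Nat) : Int)
      = (enc (lv a (j + 1)), prefMax a (j + 1)) := by
  unfold altStepQ
  simp only [PySem.List.pyGetD_natCast]
  have hlv : ∀ b : Bool, violQ a (j + 1) = b →
      lv a (j + 1) = (if b then some (j + 1) else lv a j) := by
    intro b hb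
    simp [lv, hb]
  have hpm : prefMax a (j + 1) = max (prefMax a j) (a.getD (j + 1) 0) := rfl
  by_cases h1 : a.getD (j + 1) 0 < prefMax a j
  · rw [if_pos h1, hlv true ((violQ_iff_prefMax a j h).mpr h1), hpm,
      max_eq_left (le_of_lt h1)]
    rfl
  · rw [if_neg h1]
    have hviol : violQ a (j + 1) = false := by
      rw [← Bool.not_eq_true, violQ_iff_prefMax a j h]; exact h1
    by_cases h2 : prefMax a j < a.getD (j + 1) 0
    · rw [if_pos h2, hlv false hviol, hpm, max_eq_right (le_of_lt h2)]
      rfl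
    · rw [if_neg h2, hlv false hviol, hpm]
      have : prefMax a j = a.getD (j + 1) 0 := by omega
      rw [← this, max_self]
      rfl

theorem foldQ_inv (a : List Int) : ∀ j : Nat, j < a.length →
    (PySem.List.pyRange 1 ((j : Int) + 1) 1).foldl (altStepQ a) (enc (lv a 0), prefMax a 0)
      = (enc (lv a j), prefMax a j) := by
  intro j
  induction j with
  | zero =>
    intro _
    rw [show ((0 : Nat) : Int) + 1 = 1 by norm_num, PySem.List.pyRange_one_eq_nil (le_refl 1)]
    rfl
  | succ j ih =>
    intro h
    rw [PySem.List.pyRange_one_succ_right (by push_cast; omega : (1 : Int) ≤ ((j + 1 : Nat) : Int))]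
    rw [List.foldl_append]
    rw [show ((j + 1 : Nat) : Int) = ((j : Nat) : Int) + 1 by push_cast; ring] 
    rw [ih (by omega)]
    simp only [List.foldl_cons, List.foldl_nil]
    have := stepQ_spec a j h
    rw [show ((j + 1 : Nat) : Int) = ((j : Nat) : Int) + 1 by push_cast; ring] at this
    exact this
-- ---------- agreement prefixes/suffixes vs the sorted copy ----------

theorem take_eq_of_agree (a : List Int) (m : Nat)
    (hm : ∀ k, k < m → k < a.length → a.getD k 0 = (srt a).getD k 0) :
    a.take m = (srt a).take m := by
  apply List.ext_getElem (by simp [List.length_take, srt_length])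
  intro i h1 h2
  have hi : i < m ∧ i < a.length := by
    have h := h1; simp [List.length_take] at h; omega
  rw [List.getElem_take, List.getElem_take]
  have := hm i hi.1 hi.2
  rwa [List.getD_eq_getElem a 0 hi.2, List.getD_eq_getElem _ 0 (by rw [srt_length]; omega)] at this

theorem drop_perm_of_agree (a : List Int) (m : Nat)
    (hm : ∀ k, k < m → k < a.length → a.getD k 0 = (srt a).getD k 0) :
    (a.drop m).Perm ((srt a).drop m) := by
  have key : (a.take m ++ a.drop m).Perm (a.take m ++ (srt a).drop m) := by
    rw [List.take_append_drop]
    conv_rhs => rw [take_eq_of_agree a m hm, List.take_append_drop]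
    exact (srt_perm a).symm
  exact (List.perm_append_left_iff (a.take m)).mp key

theorem drop_eq_of_agree (a : List Int) (m : Nat)
    (hm : ∀ k, m ≤ k → k < a.length → a.getD k 0 = (srt a).getD k 0) :
    a.drop m = (srt a).drop m := by
  apply List.ext_getElem (by simp [List.length_drop, srt_length])
  intro i h1 h2
  have hi : m + i < a.length := by
    have h := h1; simp [List.length_drop] at h; omega
  rw [List.getElem_drop, List.getElem_drop]
  have := hm (m + i) (by omega) hi
  rwa [List.getD_eq_getElem a 0 hi, List.getD_eq_getElem _ 0 (by rw [srt_length]; omega)] at this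

theorem take_perm_of_agree (a : List Int) (m : Nat)
    (hm : ∀ k, m ≤ k → k < a.length → a.getD k 0 = (srt a).getD k 0) :
    (a.take m).Perm ((srt a).take m) := by
  have key : (a.take m ++ a.drop m).Perm ((srt a).take m ++ a.drop m) := by
    rw [List.take_append_drop]
    conv_rhs => rw [drop_eq_of_agree a m hm, List.take_append_drop]
    exact (srt_perm a).symm
  exact (List.perm_append_right_iff (a.drop m)).mp key

-- ---------- head and last of the mismatch list ----------

theorem mism_head_facts (a : List Int) (i0 : Nat) (rest : List Nat) (hm : mism a = i0 :: rest) :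
    i0 < a.length ∧ a.getD i0 0 ≠ (srt a).getD i0 0 ∧
      ∀ k, k < i0 → k < a.length → a.getD k 0 = (srt a).getD k 0 := by
  have hmem : i0 ∈ mism a := by rw [hm]; exact List.mem_cons_self
  have h1 := (mem_mism a i0).mp hmem
  refine ⟨h1.1, h1.2, ?_⟩
  intro k hk hkn
  by_contra hne
  have hkm : k ∈ mism a := (mem_mism a k).mpr ⟨hkn, hne⟩
  rw [hm] at hkm
  rcases List.mem_cons.mp hkm with he | hr
  · omega
  · have hp := mism_pairwise a
    rw [hm, List.pairwise_cons] at hp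
    have := hp.1 k hr
    omega

theorem mism_mem_le_getLast (a : List Int) (hne0 : mism a ≠ []) :
    ∀ x ∈ mism a, x ≤ (mism a).getLast hne0 := by
  intro x hx
  have hsplit := List.dropLast_append_getLast hne0
  have hp := mism_pairwise a
  rw [← hsplit] at hp hx
  rw [List.pairwise_append] at hp
  rcases List.mem_append.mp hx with h | h
  · exact le_of_lt (hp.2.2 x h _ (List.mem_singleton_self _))
  · rw [List.mem_singleton] at h
    omega

theorem mism_last_facts (a : List Int) (hne0 : mism a ≠ []) :
    (mism a).getLast hne0 < a.length ∧
      a.getD ((mism a).getLast hne0) 0 ≠ (srt a).getD ((mism a).getLast hne0) 0 ∧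
      ∀ k, (mism a).getLast hne0 < k → k < a.length → a.getD k 0 = (srt a).getD k 0 := by
  have hmem : (mism a).getLast hne0 ∈ mism a := List.getLast_mem hne0
  have h1 := (mem_mism a _).mp hmem
  refine ⟨h1.1, h1.2, ?_⟩
  intro k hk hkn
  by_contra hc
  have hkm : k ∈ mism a := (mem_mism a k).mpr ⟨hkn, hc⟩
  have := mism_mem_le_getLast a hne0 k hkm
  omega

-- ---------- the first/last mismatches are the leftmost/rightmost violations ----------

theorem viol_at_first (a : List Int) (i0 : Nat) (rest : List Nat) (hm : mism a = i0 :: rest) :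
    violP a i0 = true := by
  obtain ⟨hi0n, hne, hagree⟩ := mism_head_facts a i0 rest hm
  have hdp : (a.drop i0).Perm ((srt a).drop i0) :=
    drop_perm_of_agree a i0 (fun k hk hkn => hagree k hk hkn)
  have h1 : (srt a).getD i0 0 ∈ (srt a).drop i0 :=
    (mem_drop_iff _ i0 _).mpr ⟨i0, le_refl _, by rw [srt_length]; exact hi0n, rfl⟩
  obtain ⟨j, hj1, hj2, hj3⟩ := (mem_drop_iff a i0 _).mp (hdp.mem_iff.mpr h1)
  have h3 : a.getD i0 0 ∈ (srt a).drop i0 :=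
    hdp.mem_iff.mp ((mem_drop_iff a i0 _).mpr ⟨i0, le_refl _, hi0n, rfl⟩)
  obtain ⟨k', hk1, hk2, hk3⟩ := (mem_drop_iff _ i0 _).mp h3
  have h4 : (srt a).getD i0 0 ≤ a.getD i0 0 := by
    rw [← hk3]
    exact srt_mono a hk1 (by rw [srt_length] at hk2; exact hk2)
  have hji0 : j ≠ i0 := by
    intro he
    subst he
    exact hne (by rw [hj3])
  rw [violP_iff]
  exact ⟨j, by omega, hj2, by rw [hj3]; omega⟩

theorem noviol_below_first (a : List Int) (i0 : Nat) (rest : List Nat) (hm : mism a = i0 :: rest) :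
    ∀ k, k < i0 → violP a k = false := by
  obtain ⟨hi0n, hne, hagree⟩ := mism_head_facts a i0 rest hm
  intro k hk
  rw [← Bool.not_eq_true, violP_iff]
  rintro ⟨j, hj1, hj2, hj3⟩
  have hdp : (a.drop (k + 1)).Perm ((srt a).drop (k + 1)) :=
    drop_perm_of_agree a (k + 1) (fun m hmk hmn => hagree m (by omega) hmn)
  have h1 : a.getD j 0 ∈ (srt a).drop (k + 1) :=
    hdp.mem_iff.mp ((mem_drop_iff a (k + 1) _).mpr ⟨j, by omega, hj2, rfl⟩)
  obtain ⟨k', hk1, hk2, hk3⟩ := (mem_drop_iff _ _ _).mp h1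
  have h2 : (srt a).getD k 0 ≤ (srt a).getD k' 0 :=
    srt_mono a (by omega) (by rw [srt_length] at hk2; exact hk2)
  have hak : a.getD k 0 = (srt a).getD k 0 := hagree k hk (by omega)
  omega

theorem violQ_at_last (a : List Int) (hne0 : mism a ≠ []) :
    violQ a ((mism a).getLast hne0) = true := by
  obtain ⟨hj0n, hmj, habove⟩ := mism_last_facts a hne0
  have htp : (a.take ((mism a).getLast hne0 + 1)).Perm ((srt a).take ((mism a).getLast hne0 + 1)) :=
    take_perm_of_agree a _ (fun k hk hkn => habove k (by omega) hkn)
  have h1 : (srt a).getD ((mism a).getLast hne0) 0 ∈ (srt a).take ((mism a).getLast hne0 + 1) :=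
    (mem_take_iff _ _ _).mpr ⟨(mism a).getLast hne0, by omega, by rw [srt_length]; exact hj0n, rfl⟩
  obtain ⟨i, hi1, hi2, hi3⟩ := (mem_take_iff a _ _).mp (htp.mem_iff.mpr h1)
  have hij : i ≠ (mism a).getLast hne0 := by
    intro he
    rw [he] at hi3
    exact hmj hi3
  have h3 : a.getD ((mism a).getLast hne0) 0 ∈ (srt a).take ((mism a).getLast hne0 + 1) :=
    htp.mem_iff.mp ((mem_take_iff a _ _).mpr ⟨(mism a).getLast hne0, by omega, hj0n, rfl⟩)
  obtain ⟨i', hi'1, hi'2, hi'3⟩ := (mem_take_iff _ _ _).mp h3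
  have h4 : a.getD ((mism a).getLast hne0) 0 ≤ (srt a).getD ((mism a).getLast hne0) 0 := by
    rw [← hi'3]
    exact srt_mono a (by omega) hj0n
  rw [violQ_iff]
  exact ⟨i, by omega, by rw [hi3]; omega⟩

theorem noviolQ_above_last (a : List Int) (hne0 : mism a ≠ []) :
    ∀ k, (mism a).getLast hne0 < k → k < a.length → violQ a k = false := by
  obtain ⟨hj0n, hmj, habove⟩ := mism_last_facts a hne0
  intro k hk hkn
  rw [← Bool.not_eq_true, violQ_iff]
  rintro ⟨i, hik, hlt⟩
  have htp : (a.take k).Perm ((srt a).take k) :=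
    take_perm_of_agree a k (fun m hm hmn => habove m (by omega) hmn)
  have h1 : a.getD i 0 ∈ (srt a).take k :=
    htp.mem_iff.mp ((mem_take_iff a k _).mpr ⟨i, hik, by omega, rfl⟩)
  obtain ⟨i', hi'1, hi'2, hi'3⟩ := (mem_take_iff _ _ _).mp h1
  have h2 : (srt a).getD i' 0 ≤ (srt a).getD k 0 := srt_mono a (by omega) hkn
  have h3 : a.getD k 0 = (srt a).getD k 0 := habove k hk hkn
  omega
-- ---------- counting argument: the two mismatching values are each other's ----------

theorem mism_not_singleton (a : List Int) (i0 : Nat) (hm : mism a = [i0]) : False := by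
  obtain ⟨hi0n, hne, _⟩ := mism_head_facts a i0 [] hm
  have hoth : ∀ k, k < a.length → k ≠ i0 → a.getD k 0 = (srt a).getD k 0 := by
    intro k hkn hki
    by_contra hc
    have : k ∈ mism a := (mem_mism a k).mpr ⟨hkn, hc⟩
    rw [hm, List.mem_singleton] at this
    exact hki this
  have hset : (srt a).set i0 (a.getD i0 0) = a := by
    apply List.ext_getElem (by rw [List.length_set, srt_length])
    intro k h1 h2
    rw [List.getElem_set]
    split_ifs with hk
    · subst hk
      exact List.getD_eq_getElem a 0 h2
    · have := (hoth k h2 (fun he => hk he.symm)).symm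
      rwa [List.getD_eq_getElem a 0 h2,
        List.getD_eq_getElem _ 0 (by rw [srt_length]; exact h2)] at this
  have hc := count_set_eq (srt a) i0 (by rw [srt_length]; exact hi0n) (a.getD i0 0) (a.getD i0 0)
  rw [hset] at hc
  have hcnt : a.count (a.getD i0 0) = (srt a).count (a.getD i0 0) :=
    ((srt_perm a).count_eq (a.getD i0 0)).symm
  rw [if_pos rfl] at hc
  rw [if_neg (fun h => hne h.symm)] at hc
  omega

theorem swap_vals (a : List Int) (i0 j0 : Nat) (hne : i0 ≠ j0) (hi0 : i0 < a.length)
    (hj0 : j0 < a.length)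
    (hmi : a.getD i0 0 ≠ (srt a).getD i0 0) (hmj : a.getD j0 0 ≠ (srt a).getD j0 0)
    (hoth : ∀ k, k < a.length → k ≠ i0 → k ≠ j0 → a.getD k 0 = (srt a).getD k 0) :
    a.getD i0 0 = (srt a).getD j0 0 ∧ a.getD j0 0 = (srt a).getD i0 0 := by
  have hsl : (srt a).length = a.length := srt_length a
  have ht : ((srt a).set i0 (a.getD i0 0)).set j0 (a.getD j0 0) = a := by
    apply List.ext_getElem (by rw [List.length_set, List.length_set, srt_length])
    intro k h1 h2
    rw [List.getElem_set, List.getElem_set]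
    split_ifs with hk1 hk2
    · subst hk1
      exact List.getD_eq_getElem a 0 h2
    · subst hk2
      exact List.getD_eq_getElem a 0 h2
    · have := (hoth k h2 (fun he => hk2 he.symm) (fun he => hk1 he.symm)).symm
      rwa [List.getD_eq_getElem a 0 h2,
        List.getD_eq_getElem _ 0 (by rw [srt_length]; exact h2)] at this
  have key : ∀ v, (if (srt a).getD i0 0 = v then (1 : Nat) else 0)
      + (if (srt a).getD j0 0 = v then 1 else 0)
      = (if a.getD i0 0 = v then 1 else 0) + (if a.getD j0 0 = v then 1 else 0) := by
    intro v
    have e1 := count_set_eq ((srt a).set i0 (a.getD i0 0)) j0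
      (by rw [List.length_set]; omega) (a.getD j0 0) v
    have e2 := count_set_eq (srt a) i0 (by omega) (a.getD i0 0) v
    have hg : ((srt a).set i0 (a.getD i0 0)).getD j0 0 = (srt a).getD j0 0 := by
      rw [List.getD_eq_getElem _ 0 (by rw [List.length_set]; omega),
        List.getD_eq_getElem _ 0 (by omega : j0 < (srt a).length),
        List.getElem_set_ne hne]
    rw [ht, hg] at e1
    have hcnt : a.count v = (srt a).count v := ((srt_perm a).count_eq v).symm
    split_ifs at e1 e2 ⊢ <;> omega
  have h1 : (srt a).getD j0 0 = a.getD i0 0 := by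
    by_cases c : (srt a).getD j0 0 = a.getD i0 0
    · exact c
    · have k1 := key (a.getD i0 0)
      rw [if_neg (fun h => hmi h.symm), if_neg c, if_pos rfl] at k1
      split_ifs at k1 <;> omega
  have hvne : a.getD i0 0 ≠ a.getD j0 0 := by
    intro he
    have k1 := key (a.getD i0 0)
    rw [if_neg (fun h => hmi h.symm), if_pos h1, if_pos rfl, if_pos he.symm] at k1
    omega
  have h2 : (srt a).getD i0 0 = a.getD j0 0 := by
    by_cases c : (srt a).getD i0 0 = a.getD j0 0
    · exact c
    · have k2 := key (a.getD j0 0)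
      rw [if_neg c, if_neg (h1 ▸ hvne), if_neg hvne, if_pos rfl] at k2
      omega
  exact ⟨h1.symm, h2.symm⟩

theorem swap_perm (a : List Int) (i0 j0 : Nat) (hne : i0 ≠ j0) (hi0 : i0 < a.length)
    (hj0 : j0 < a.length) :
    ((a.set i0 (a.getD j0 0)).set j0 (a.getD i0 0)).Perm a := by
  rw [List.perm_iff_count]
  intro v
  have e1 := count_set_eq (a.set i0 (a.getD j0 0)) j0
    (by rw [List.length_set]; exact hj0) (a.getD i0 0) v
  have e2 := count_set_eq a i0 hi0 (a.getD j0 0) v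
  have hg : (a.set i0 (a.getD j0 0)).getD j0 0 = a.getD j0 0 := by
    rw [List.getD_eq_getElem _ 0 (by rw [List.length_set]; exact hj0),
      List.getD_eq_getElem _ 0 hj0, List.getElem_set_ne hne]
  rw [hg] at e1
  split_ifs at e1 e2 <;> omega

-- ---------- one swap sorts  ⇔  exactly two mismatches ----------

theorem two_iff_swap_sorted (a : List Int) (i0 j0 : Nat) (rest : List Nat)
    (hm : mism a = i0 :: rest) (hne0 : mism a ≠ [])
    (hj : (mism a).getLast hne0 = j0) (hne : i0 ≠ j0) (hij : i0 < j0) :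
    ((a.set i0 (a.getD j0 0)).set j0 (a.getD i0 0)).Pairwise (· ≤ ·)
      ↔ (mism a).length = 2 := by
  obtain ⟨hi0n, hmi, hbelow⟩ := mism_head_facts a i0 rest hm
  obtain ⟨hj0n', hmj', habove'⟩ := mism_last_facts a hne0
  rw [hj] at hj0n' hmj' habove'
  have hlt : ((a.set i0 (a.getD j0 0)).set j0 (a.getD i0 0)).length = a.length := by
    rw [List.length_set, List.length_set]
  constructor
  · intro hpw
    have hperm := swap_perm a i0 j0 hne hi0n hj0n'
    have hst : srt a = (a.set i0 (a.getD j0 0)).set j0 (a.getD i0 0) :=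
      PySem.List.sorted_id_eq_of_perm_of_pairwise a _ hperm hpw
    have hsub : ∀ k ∈ mism a, k = i0 ∨ k = j0 := by
      intro k hk
      rw [mem_mism] at hk
      by_contra hc
      push_neg at hc
      have hkn : k < a.length := hk.1
      have hagr : a.getD k 0 = (srt a).getD k 0 := by
        rw [hst, List.getD_eq_getElem a 0 hkn,
          List.getD_eq_getElem _ 0
            (show k < ((a.set i0 (a.getD j0 0)).set j0 (a.getD i0 0)).length by
              rw [hlt]; exact hkn),
          List.getElem_set_ne (fun he => hc.2 he.symm),
          List.getElem_set_ne (fun he => hc.1 he.symm)]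
      exact hk.2 hagr
    have hrest : rest = [j0] := by
      have hjrest : j0 ∈ rest := by
        have hjm : j0 ∈ mism a := hj ▸ List.getLast_mem hne0
        rw [hm] at hjm
        rcases List.mem_cons.mp hjm with he | hr
        · omega
        · exact hr
      have hp := mism_pairwise a
      rw [hm, List.pairwise_cons] at hp
      rcases rest with _ | ⟨r, rs⟩
      · simp at hjrest
      · have hr : r = j0 := by
          have hrm : r ∈ mism a := by rw [hm]; exact List.mem_cons_of_mem _ List.mem_cons_self
          rcases hsub r hrm with he | he
          · have := hp.1 r List.mem_cons_self; omega
          · exact he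
        rcases rs with _ | ⟨r2, rs2⟩
        · rw [hr]
        · exfalso
          have hr2m : r2 ∈ mism a := by
            rw [hm]
            exact List.mem_cons_of_mem _ (List.mem_cons_of_mem _ List.mem_cons_self)
          have hp2 := hp.2
          rw [List.pairwise_cons] at hp2
          have hrr2 : r < r2 := hp2.1 r2 List.mem_cons_self
          rcases hsub r2 hr2m with he | he
          · have := hp.1 r2 (List.mem_cons_of_mem _ List.mem_cons_self); omega
          · omega
    rw [hm, hrest]
    rfl
  · intro hlen
    have hrest : rest = [j0] := by
      rw [hm] at hlen
      simp only [List.length_cons] at hlen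
      have : rest.length = 1 := by omega
      obtain ⟨r, hr⟩ := List.length_eq_one_iff.mp this
      have : (mism a).getLast hne0 = r := by
        have hmm2 : mism a = [i0, r] := by rw [hm, hr]
        simp [hmm2]
      rw [hr, ← hj, this]
    have hm2 : mism a = [i0, j0] := by rw [hm, hrest]
    have hoth : ∀ k, k < a.length → k ≠ i0 → k ≠ j0 → a.getD k 0 = (srt a).getD k 0 := by
      intro k hkn hk1 hk2
      by_contra hc
      have : k ∈ mism a := (mem_mism a k).mpr ⟨hkn, hc⟩
      rw [hm2] at this
      rcases List.mem_cons.mp this with he | hr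
      · exact hk1 he
      · rw [List.mem_singleton] at hr
        exact hk2 hr
    obtain ⟨hv1, hv2⟩ := swap_vals a i0 j0 hne hi0n hj0n' hmi hmj' hoth
    have hts : (a.set i0 (a.getD j0 0)).set j0 (a.getD i0 0) = srt a := by
      apply List.ext_getElem (by rw [hlt, srt_length])
      intro k h1 h2
      rw [List.getElem_set, List.getElem_set]
      split_ifs with hk1 hk2
      · subst hk1
        rw [hv1]
        exact List.getD_eq_getElem _ 0 (by rw [srt_length]; exact hj0n')
      · subst hk2
        rw [hv2]
        exact List.getD_eq_getElem _ 0 (by rw [srt_length]; exact hi0n)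
      · have hka : k < a.length := by rw [hlt] at h1; exact h1
        have := hoth k hka (fun he => hk2 he.symm) (fun he => hk1 he.symm)
        rw [List.getD_eq_getElem a 0 hka,
          List.getD_eq_getElem _ 0 (by rw [srt_length]; exact hka)] at this
        exact this
    rw [hts]
    exact srt_pairwise a

-- ---------- the final all() check is Pairwise ----------

theorem allCheck_eq (t : List Int) (n : Nat) (hlen : t.length = n) :
    ((PySem.List.pyRange 0 ((n : Int) - 1) 1).all
      (fun k => decide (PySem.List.pyGetD t k 0 ≤ PySem.List.pyGetD t (k + 1) 0)))
      = decide (t.Pairwise (· ≤ ·)) := by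
  have hiff : ((PySem.List.pyRange 0 ((n : Int) - 1) 1).all
      (fun k => decide (PySem.List.pyGetD t k 0 ≤ PySem.List.pyGetD t (k + 1) 0)) = true)
      ↔ (∀ k, k + 1 < t.length → t.getD k 0 ≤ t.getD (k + 1) 0) := by
    rw [List.all_eq_true]
    constructor
    · intro h k hk
      have hmem : ((k : Nat) : Int) ∈ PySem.List.pyRange 0 ((n : Int) - 1) 1 := by
        rw [PySem.List.mem_pyRange_one]
        constructor
        · omega
        · rw [hlen] at hk; push_cast; omega
      have := h _ hmem
      rw [decide_eq_true_eq, PySem.List.pyGetD_natCast,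
        show ((k : Nat) : Int) + 1 = ((k + 1 : Nat) : Int) by push_cast; ring,
        PySem.List.pyGetD_natCast] at this
      exact this
    · intro h x hx
      rw [PySem.List.mem_pyRange_one] at hx
      rw [decide_eq_true_eq]
      have hx0 : 0 ≤ x := hx.1
      have hx1 : 0 ≤ x + 1 := by omega
      rw [PySem.List.pyGetD_of_nonneg t 0 hx0, PySem.List.pyGetD_of_nonneg t 0 hx1,
        show (x + 1).toNat = x.toNat + 1 by omega]
      apply h
      rw [hlen]
      omega
  by_cases hp : t.Pairwise (· ≤ ·)
  · rw [decide_eq_true hp]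
    exact hiff.mpr ((pairwise_iff_adj t).mp hp)
  · rw [decide_eq_false hp]
    apply Bool.eq_false_iff.mpr
    intro hc
    exact hp ((pairwise_iff_adj t).mpr (hiff.mp hc))

theorem pairwise_of_short (a : List Int) (h : a.length < 2) : a.Pairwise (· ≤ ·) := by
  rcases a with _ | ⟨x, _ | ⟨y, t⟩⟩
  · exact List.Pairwise.nil
  · simp
  · simp at h
-- ---------- the master lemma for B ----------

theorem solution_alt_spec (a : List Int) :
    solution_alt a = decide ((mism a).length = 0 ∨ (mism a).length = 2) := by
  unfold solution_alt
  by_cases hn : (a.length : Int) < 2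
  · rw [if_pos hn]
    have hpw : a.Pairwise (· ≤ ·) := pairwise_of_short a (by exact_mod_cast hn)
    have hnil : mism a = [] := (mism_nil_iff a).mpr hpw
    rw [hnil]
    simp
  · rw [if_neg hn]
    simp only []
    have hn2 : 2 ≤ a.length := by omega
    have hinit1 : ((-1 : Int), PySem.List.pyGetD a ((a.length : Int) - 1) 0)
        = (enc (fv a (a.length - 2 + 1)), suffMin a (a.length - 2 + 1)) := by
      have h1 : a.length - 2 + 1 = a.length - 1 := by omega
      rw [h1, show ((a.length : Int) - 1) = ((a.length - 1 : Nat) : Int) by push_cast; omega,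
        PySem.List.pyGetD_natCast]
      have hfvp : enc (fv a (a.length - 1)) = -1 := by
        rw [fv_pred a (by omega)]; rfl
      have hsm : suffMin a (a.length - 1) = a.getD (a.length - 1) 0 := by
        conv_lhs => unfold suffMin
        rw [dif_neg (by omega : ¬(a.length - 1 + 1 < a.length))]
      rw [hfvp, hsm]
    rw [show ((a.length : Int) - 2) = ((a.length - 2 : Nat) : Int) by push_cast; omega,
      hinit1, foldP_inv a (a.length - 2) (by omega)]
    rcases hmm : mism a with _ | ⟨i0, rest⟩
    · have hpw := (mism_nil_iff a).mp hmm
      rw [fv_none_of_pairwise a hpw]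
      simp [enc]
    · have hne0 : mism a ≠ [] := by rw [hmm]; simp
      obtain ⟨hi0n, hmi, hbelow⟩ := mism_head_facts a i0 rest hmm
      have hfv : fv a 0 = some i0 :=
        fv_of_first a i0 hi0n (viol_at_first a i0 rest hmm) (noviol_below_first a i0 rest hmm)
      rw [hfv]
      have hne1 : enc (some i0) ≠ -1 := by simp [enc]
      rw [if_neg hne1]
      -- the left-to-right scan
      have hinit2 : ((-1 : Int), PySem.List.pyGetD a 0 0) = (enc (lv a 0), prefMax a 0) := by
        rw [PySem.List.pyGetD_zero]
        rfl
      rw [show ((a.length : Int)) = ((a.length - 1 : Nat) : Int) + 1 by push_cast; omega,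
        hinit2, foldQ_inv a (a.length - 1) (by omega)]
      -- j0, the last mismatch
      obtain ⟨j0, hj0eq⟩ : ∃ j0, (mism a).getLast hne0 = j0 := ⟨_, rfl⟩
      have hij : i0 < j0 := by
        have hjm : j0 ∈ mism a := hj0eq ▸ List.getLast_mem hne0
        rw [hmm] at hjm
        rcases List.mem_cons.mp hjm with he | hr
        · exfalso
          have hrest : rest = [] := by
            rcases hr2 : rest with _ | ⟨r, rs⟩
            · rfl
            · exfalso
              have hrm : r ∈ mism a := by
                rw [hmm, hr2]; exact List.mem_cons_of_mem _ List.mem_cons_self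
              have hle := mism_mem_le_getLast a hne0 r hrm
              rw [hj0eq] at hle
              have hp := mism_pairwise a
              rw [hmm, hr2, List.pairwise_cons] at hp
              have := hp.1 r List.mem_cons_self
              omega
          rw [hrest] at hmm
          exact mism_not_singleton a i0 hmm
        · have hp := mism_pairwise a
          rw [hmm, List.pairwise_cons] at hp
          exact hp.1 _ hr
      obtain ⟨hj0n, hmj, habove⟩ := mism_last_facts a hne0
      rw [hj0eq] at hj0n hmj habove
      have hlv : lv a (a.length - 1) = some j0 := by
        have hl := lv_of_last a ((mism a).getLast hne0) (violQ_at_last a hne0) (noviolQ_above_last a hne0)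
          (a.length - 1) (by rw [hj0eq]; omega) (by omega)
        rwa [hj0eq] at hl
      rw [hlv]
      simp only [enc]
      simp only [PySem.List.pySetD_natCast, PySem.List.pyGetD_natCast]
      rw [show ((a.length - 1 : Nat) : Int) + 1 - 1 = (a.length : Int) - 1 by push_cast; omega]
      rw [allCheck_eq ((a.set i0 (a.getD j0 0)).set j0 (a.getD i0 0)) a.length
        (by rw [List.length_set, List.length_set])]
      have htwo := two_iff_swap_sorted a i0 j0 rest hmm hne0 hj0eq (by omega) hij
      rw [hmm] at htwo
      by_cases h2 : (i0 :: rest).length = 2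
      · rw [decide_eq_true (htwo.mpr h2), decide_eq_true (Or.inr h2 :
          (i0 :: rest).length = 0 ∨ (i0 :: rest).length = 2)]
      · have hnp : ¬ ((a.set i0 (a.getD j0 0)).set j0 (a.getD i0 0)).Pairwise (· ≤ ·) :=
          fun hp => h2 (htwo.mp hp)
        have hor : ¬ ((i0 :: rest).length = 0 ∨ (i0 :: rest).length = 2) := by
          rintro (h0 | h2')
          · simp at h0
          · exact h2 h2'
        rw [decide_eq_false hnp, decide_eq_false hor]

-- ===== VERDICT (by name: the statement is the Claim_ definition above) =====
theorem solution_spec : Claim_equal_solution := by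
  intro A _hD
  unfold Spec_solution
  rw [solution_eq_mism, solution_alt_spec]
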